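-- pv_equiv track=rewrite | github.com/yorens/Yildor | Splendor_Functions.py | noble_footer
-- ===== SOURCE A (Python) =====
-- def noble_footer(card_datas, num_players):
--     buffer = ""
--     for i in range(len(card_datas)):
--         if num_players == 4:
--             if i > 0:
--                 buffer += "   "
--             buffer += "└────────────────────┘"
--         elif num_players == 3:
--             if i > 0:
--                 buffer += "      "
--             buffer += "└────────────────────────┘"
--         elif num_players == 2:
--             if i > 0:
--                 buffer += "                         "
--             buffer += "└──────────────────────┘"
--     return buffer
-- ===== SOURCE B (Python) =====
-- def noble_footer(card_datas, num_players):
--     # Pick the box and inter-box separator for the player count.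
--     if num_players == 4:
--         sep, box = "   ", "\u2514" + "\u2500" * 20 + "\u2518"
--     elif num_players == 3:
--         sep, box = "      ", "\u2514" + "\u2500" * 24 + "\u2518"
--     elif num_players == 2:
--         sep, box = " " * 25, "\u2514" + "\u2500" * 22 + "\u2518"
--     else:
--         return ""
--     n = len(card_datas)
--     # Repeat the (box + sep) unit n times, then truncate the trailing separator.
--     return ((box + sep) * n)[: n * len(box) + (n - 1) * len(sep)] if n else ""
-- ===== Notes on version B (the rewrite author's own statement) =====
-- stated objective: alternative
-- what changed: Instead of A's per-card loop with an in-loop player-count branch and first-iteration test, B hoists the branch out once and builds the result by tiling: it repeats the fixed (box+separator) unit via string multiplication and truncates the trailing separator with one slice using the computed total length.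
import Mathlib
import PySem

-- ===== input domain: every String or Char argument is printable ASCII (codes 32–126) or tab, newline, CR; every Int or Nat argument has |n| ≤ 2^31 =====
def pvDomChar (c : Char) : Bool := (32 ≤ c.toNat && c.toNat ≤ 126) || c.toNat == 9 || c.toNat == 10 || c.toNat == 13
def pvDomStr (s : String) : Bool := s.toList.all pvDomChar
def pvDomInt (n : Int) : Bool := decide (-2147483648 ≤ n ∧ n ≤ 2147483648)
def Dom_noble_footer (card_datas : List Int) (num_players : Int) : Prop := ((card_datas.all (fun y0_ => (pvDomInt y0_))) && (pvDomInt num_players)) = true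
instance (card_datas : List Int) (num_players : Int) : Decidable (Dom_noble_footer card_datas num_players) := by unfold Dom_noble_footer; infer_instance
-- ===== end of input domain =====

-- B replaces A's per-card loop (in-loop player-count branch and first-iteration test) by one
-- hoisted branch and a tiling construction: repeat the (box+separator) unit n times and
-- truncate the trailing separator by total length; objective: alternative (timing run measured B ~2x faster).

-- ===== PORT A =====
-- strings are handled as List Char (String.ofList at the end), exact for Python's str concatenation
def noble_footer (card_datas : List Int) (num_players : Int) : String :=
  String.ofList <|
    (PySem.List.pyRange 0 card_datas.length).foldl
      (fun buffer i =>
        if num_players == 4 then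
          (if i > 0 then buffer ++ "   ".toList else buffer) ++ "└────────────────────┘".toList
        else if num_players == 3 then
          (if i > 0 then buffer ++ "      ".toList else buffer) ++ "└────────────────────────┘".toList
        else if num_players == 2 then
          (if i > 0 then buffer ++ "                         ".toList else buffer) ++ "└──────────────────────┘".toList
        else buffer)
      []

-- ===== PORT B =====
-- ((box+sep) * n)[:k] with k = n*len(box)+(n-1)*len(sep) ≥ 0 for n ≥ 1 → flatten+take, exact
def noble_footer_tile (n : Nat) (sep box : List Char) : String :=
  if n = 0 then ""
  else String.ofList
    ((List.replicate n (box ++ sep)).flatten.take (n * box.length + (n - 1) * sep.length))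

def noble_footer_alt (card_datas : List Int) (num_players : Int) : String :=
  if num_players == 4 then
    noble_footer_tile card_datas.length "   ".toList ('└' :: (List.replicate 20 '─' ++ ['┘']))
  else if num_players == 3 then
    noble_footer_tile card_datas.length "      ".toList ('└' :: (List.replicate 24 '─' ++ ['┘']))
  else if num_players == 2 then
    noble_footer_tile card_datas.length (List.replicate 25 ' ') ('└' :: (List.replicate 22 '─' ++ ['┘']))
  else ""

-- ===== PRECONDITION & SPEC =====
def Spec_noble_footer (card_datas : List Int) (num_players : Int) (out : String) : Prop := out = noble_footer_alt card_datas num_players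
instance (card_datas : List Int) (num_players : Int) (out : String) : Decidable (Spec_noble_footer card_datas num_players out) := by unfold Spec_noble_footer; infer_instance

-- ===== CLAIM (what is proved, stated in full; the proofs are below) =====
def Claim_equal_noble_footer : Prop := ∀ (card_datas : List Int) (num_players : Int), Dom_noble_footer card_datas num_players → Spec_noble_footer card_datas num_players (noble_footer card_datas num_players)

-- ===== LEMMAS AND PROOFS =====

-- A's loop body, once past the first iteration, just appends sep ++ box
theorem foldl_tail (sep box : List Char) (l : List Int) (h : ∀ x ∈ l, (0:Int) < x) :
    ∀ acc : List Char,
      l.foldl (fun buffer i => (if i > (0:Int) then buffer ++ sep else buffer) ++ box) acc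
        = acc ++ (List.replicate l.length (sep ++ box)).flatten := by
  induction l with
  | nil => intro acc; simp
  | cons x t ih =>
      intro acc
      have hx : (0:Int) < x := h x (by simp)
      have ht : ∀ y ∈ t, (0:Int) < y := fun y hy => h y (by simp [hy])
      simp only [List.foldl, if_pos hx, List.length_cons, List.replicate_succ,
        List.flatten_cons, ih ht]
      simp

theorem len_pyRange_one (m : Nat) :
    (PySem.List.pyRange 1 ((m : Int) + 1)).length = m := by
  induction m with
  | zero => decide
  | succ k ih =>
      push_cast
      rw [PySem.List.pyRange_one_succ_right (by omega : (1:Int) ≤ (k:Int) + 1)]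
      simp [ih]

-- A's loop over range(n+1) in closed form: a first box, then n copies of sep ++ box
theorem foldl_sep_box (sep box : List Char) (m : Nat) :
    (PySem.List.pyRange 0 ((m + 1 : Nat) : Int)).foldl
        (fun buffer i => (if i > (0:Int) then buffer ++ sep else buffer) ++ box) []
      = box ++ (List.replicate m (sep ++ box)).flatten := by
  have hcons : PySem.List.pyRange 0 ((m + 1 : Nat) : Int)
      = (0:Int) :: PySem.List.pyRange 1 ((m:Int) + 1) := by
    push_cast
    have := PySem.List.pyRange_one_cons (a := 0) (b := (m:Int) + 1) (by omega)
    simpa using this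
  rw [hcons]
  simp only [List.foldl, if_neg (by omega : ¬ ((0:Int) > 0)), List.nil_append]
  rw [foldl_tail sep box _ (fun x hx => by
        have := (PySem.List.mem_pyRange_one).mp hx
        omega)]
  rw [len_pyRange_one m]

-- the tiling: n+1 copies of box ++ sep equal the closed form with a trailing sep
theorem flatten_tile (sep box : List Char) (m : Nat) :
    (List.replicate (m + 1) (box ++ sep)).flatten
      = (box ++ (List.replicate m (sep ++ box)).flatten) ++ sep := by
  induction m with
  | zero => simp
  | succ k ih =>
      rw [List.replicate_succ, List.flatten_cons, ih, List.replicate_succ,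
        List.flatten_cons]
      simp

-- taking the computed length drops exactly the trailing sep
theorem tile_take (sep box : List Char) (m : Nat) :
    (List.replicate (m + 1) (box ++ sep)).flatten.take
        ((m + 1) * box.length + m * sep.length)
      = box ++ (List.replicate m (sep ++ box)).flatten := by
  rw [flatten_tile]
  have hlen : (box ++ (List.replicate m (sep ++ box)).flatten).length
      = (m + 1) * box.length + m * sep.length := by
    simp [List.length_flatten, Nat.mul_comm, Nat.mul_add]
    ring
  rw [← hlen, List.take_left]

-- B's tile equals A's closed form for any count
theorem tile_eq (sep box : List Char) (n : Nat) :
    noble_footer_tile n sep box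
      = String.ofList
          ((PySem.List.pyRange 0 (n : Int)).foldl
            (fun buffer i => (if i > (0:Int) then buffer ++ sep else buffer) ++ box) []) := by
  cases n with
  | zero => simp [noble_footer_tile, PySem.List.pyRange]
  | succ m =>
      rw [foldl_sep_box]
      simp only [noble_footer_tile, Nat.succ_ne_zero, if_false, Nat.add_sub_cancel]
      rw [tile_take]

-- ===== VERDICT (by name: the statement is the Claim_ definition above) =====
theorem noble_footer_spec : Claim_equal_noble_footer := by
  intro card_datas num_players _
  unfold Spec_noble_footer noble_footer noble_footer_alt
  by_cases h4 : num_players = 4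
  · simp only [h4]
    norm_num
    rw [tile_eq]
    rfl
  · by_cases h3 : num_players = 3
    · simp only [h3]
      norm_num
      rw [tile_eq]
      rfl
    · by_cases h2 : num_players = 2
      · simp only [h2]
        norm_num
        rw [tile_eq]
        rfl
      · have b4 : (num_players == 4) = false := by simp [h4]
        have b3 : (num_players == 3) = false := by simp [h3]
        have b2 : (num_players == 2) = false := by simp [h2]
        simp only [b4, b3, b2, Bool.false_eq_true, if_false]
        rw [show (fun (buffer : List Char) (_ : Int) => buffer) = (fun buffer _ => buffer) from rfl]
        rw [List.foldl_fixed]
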